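-- pv_equiv track=rewrite | github.com/diogo-cruz/leela-interp | src/leela_interp/core/double_branch.py | map_to_possibility
-- ===== SOURCE A (Python) =====
-- def map_to_possibility(branch_1_squares, branch_2_squares):
--     mapping = {}
--     result = []
--     counter = 1
--
--     for square in branch_1_squares:
--         if square not in mapping:
--             mapping[square] = str(counter)
--             counter += 1
--         result.append(mapping[square])
--     for square in branch_2_squares:
--         if square not in mapping:
--             mapping[square] = str(counter)
--             counter += 1
--         result.append(mapping[square])
--
--     return result
-- ===== SOURCE B (Python) =====
-- def map_to_possibility(branch_1_squares, branch_2_squares):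
--     all_sq = branch_1_squares + branch_2_squares
--     return [str(len(set(all_sq[:all_sq.index(s) + 1]))) for s in all_sq]
-- ===== Notes on version B (the rewrite author's own statement) =====
-- stated objective: alternative
-- what changed: B drops A's mapping dict and counter entirely: each square's label is computed directly as the number of distinct squares in the combined list up to and including its first occurrence (str(len(set(all[:all.index(s)+1])))), trading A's single stateful pass for stateless per-element prefix counting.
import Mathlib
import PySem

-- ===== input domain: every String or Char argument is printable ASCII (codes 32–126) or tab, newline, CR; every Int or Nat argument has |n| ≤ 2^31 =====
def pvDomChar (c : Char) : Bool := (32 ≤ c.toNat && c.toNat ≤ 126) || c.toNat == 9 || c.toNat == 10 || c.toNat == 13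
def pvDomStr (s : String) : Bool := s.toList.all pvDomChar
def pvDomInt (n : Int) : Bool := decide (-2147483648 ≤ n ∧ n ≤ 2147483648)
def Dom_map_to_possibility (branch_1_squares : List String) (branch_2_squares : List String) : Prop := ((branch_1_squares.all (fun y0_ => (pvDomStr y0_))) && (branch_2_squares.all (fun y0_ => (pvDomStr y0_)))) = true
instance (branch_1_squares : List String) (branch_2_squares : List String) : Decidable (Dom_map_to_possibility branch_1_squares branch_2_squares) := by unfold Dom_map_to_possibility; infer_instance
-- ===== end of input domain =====

-- B replaces A's mapping dict and counter by stateless per-element prefix counting: each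
-- square's label is the number of distinct squares up to and including its first occurrence.
-- Same values; B is a different algorithm, not a speed claim.

-- ===== PORT A =====
-- loop body of A's two identical 'for' loops over (mapping, result, counter)
def pvStepA (st : PySem.Dict String String × List String × Int) (square : String) :
    PySem.Dict String String × List String × Int :=
  let m := st.1
  let res := st.2.1
  let c := st.2.2
  let mc :=
    if m.contains square then (m, c)
    else (m.insert square (PySem.Int.toStr c), c + 1)
  -- result.append(mapping[square]): the key is always present here, so getD's default is never used
  (mc.1, res ++ [mc.1.getD square ""], mc.2)

def map_to_possibility (branch_1_squares : List String) (branch_2_squares : List String) : List String :=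
  let st0 : PySem.Dict String String × List String × Int := (⟨[]⟩, [], 1)
  let st1 := branch_1_squares.foldl pvStepA st0
  let st2 := branch_2_squares.foldl pvStepA st1
  st2.2.1

-- ===== PORT B =====
def map_to_possibility_alt (branch_1_squares : List String) (branch_2_squares : List String) : List String :=
  let all_sq := branch_1_squares ++ branch_2_squares
  all_sq.map (fun s =>
    -- all_sq.index(s) never raises ValueError here: s is drawn from all_sq
    match PySem.List.index? all_sq s with
    | some j =>
        PySem.Int.toStr
          (((PySem.Set.ofList (PySem.List.slice all_sq none (some ((j : Int) + 1)))).length : Int))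
    | none => "")

-- ===== PRECONDITION & SPEC =====
def Spec_map_to_possibility (branch_1_squares : List String) (branch_2_squares : List String) (out : List String) : Prop := out = map_to_possibility_alt branch_1_squares branch_2_squares
instance (branch_1_squares : List String) (branch_2_squares : List String) (out : List String) : Decidable (Spec_map_to_possibility branch_1_squares branch_2_squares out) := by unfold Spec_map_to_possibility; infer_instance

-- ===== CLAIM (what is proved, stated in full; the proofs are below) =====
def Claim_equal_map_to_possibility : Prop := ∀ (branch_1_squares : List String) (branch_2_squares : List String), Dom_map_to_possibility branch_1_squares branch_2_squares → Spec_map_to_possibility branch_1_squares branch_2_squares (map_to_possibility branch_1_squares branch_2_squares)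

-- ===== LEMMAS AND PROOFS =====

-- the label A assigns to s: its index in the first-occurrence order, plus one
def pvLab (order : List String) (s : String) : String :=
  match PySem.List.index? order s with
  | some i => PySem.Int.toStr ((i : Int) + 1)
  | none => ""

-- the association list A's dict holds when the distinct squares seen so far are o (labels from n on)
def pvLabAux : List String → Int → List (String × String)
  | [], _ => []
  | a :: t, n => (a, PySem.Int.toStr n) :: pvLabAux t (n + 1)

lemma pvLabAux_append (o : List String) (x : String) (n : Int) :
    pvLabAux (o ++ [x]) n = pvLabAux o n ++ [(x, PySem.Int.toStr (n + o.length))] := by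
  induction o generalizing n with
  | nil => simp [pvLabAux]
  | cons a t ih => simp [pvLabAux, ih, add_assoc, add_comm 1 (t.length : Int)]

lemma pvFind?_labAux (s : String) (o : List String) (n : Int) :
    List.find? (fun p => p.1 == s) (pvLabAux o n)
      = (PySem.List.index? o s).map (fun (i : Nat) => (s, PySem.Int.toStr ((i : Int) + n))) := by
  induction o generalizing n with
  | nil => simp [pvLabAux, PySem.List.index?]
  | cons a t ih =>
    by_cases h : a = s
    · subst h
      rw [PySem.List.index?_cons_self]
      simp [pvLabAux]
    · have hne : (a == s) = false := by simp [h]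
      rw [PySem.List.index?_cons_of_ne _ h]
      simp only [pvLabAux, List.find?, hne]
      rw [ih]
      cases hti : PySem.List.index? t s with
      | none => rfl
      | some i =>
        simp only [Option.map_some]
        have : ((i : Int) + (n + 1)) = (((i + 1 : Nat) : Int) + n) := by push_cast; ring
        rw [this]

lemma pvAny_labAux (o : List String) (s : String) (n : Int) :
    (pvLabAux o n).any (fun p => p.1 == s) = decide (s ∈ o) := by
  induction o generalizing n with
  | nil => simp [pvLabAux]
  | cons a t ih =>
    by_cases h : a = s
    · subst h; simp [pvLabAux]
    · simp [pvLabAux, h, ih, Ne.symm h]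

lemma pvContains_labAux (o : List String) (s : String) (n : Int) :
    (PySem.Dict.mk (pvLabAux o n)).contains s = decide (s ∈ o) := by
  simpa [PySem.Dict.contains] using pvAny_labAux o s n

lemma pvGetD_labAux (o : List String) (s : String) (hm : s ∈ o) :
    (PySem.Dict.mk (pvLabAux o 1)).getD s "" = pvLab o s := by
  have := (PySem.List.index?_isSome_iff o s).mpr hm
  cases hi : PySem.List.index? o s with
  | none => rw [hi] at this; simp at this
  | some i =>
    have hi2 : List.idxOf? s o = some i := by simpa using hi
    simp only [PySem.Dict.getD, PySem.Dict.get?, pvFind?_labAux, hi, Option.map_some,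
      Option.getD_some]
    simp [pvLab, hi2]

-- folding Set.add only appends
lemma pvAdd_extends (l o : List String) : ∃ t, l.foldl PySem.Set.add o = o ++ t := by
  induction l generalizing o with
  | nil => exact ⟨[], by simp⟩
  | cons x l ih =>
    by_cases hx : o.contains x = true
    · have hx' : x ∈ o := by simpa using hx
      have hadd : PySem.Set.add o x = o := by simp [PySem.Set.add, hx']
      obtain ⟨t, ht⟩ := ih o
      exact ⟨t, by rw [List.foldl_cons, hadd]; exact ht⟩
    · have hx' : x ∉ o := by simpa using hx
      have hadd : PySem.Set.add o x = o ++ [x] := by simp [PySem.Set.add, hx']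
      obtain ⟨t, ht⟩ := ih (o ++ [x])
      exact ⟨x :: t, by rw [List.foldl_cons, hadd, ht]; simp⟩

lemma pvLab_stable (l o : List String) (s : String) (hm : s ∈ o) :
    pvLab (l.foldl PySem.Set.add o) s = pvLab o s := by
  obtain ⟨t, ht⟩ := pvAdd_extends l o
  rw [ht]
  unfold pvLab
  rw [PySem.List.index?_append_of_mem t hm]

-- main loop invariant: A's fold, started from the state coding the seen-set o, produces the
-- state coding the final seen-set, with each square labelled by its index there
lemma pvInv (l : List String) : ∀ (o res : List String),
    l.foldl pvStepA (⟨pvLabAux o 1⟩, res, (o.length : Int) + 1)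
      = (⟨pvLabAux (l.foldl PySem.Set.add o) 1⟩,
         res ++ l.map (pvLab (l.foldl PySem.Set.add o)),
         ((l.foldl PySem.Set.add o).length : Int) + 1) := by
  induction l with
  | nil => intro o res; simp
  | cons s l ih =>
    intro o res
    by_cases hm : s ∈ o
    · have hc : (PySem.Dict.mk (pvLabAux o 1)).contains s = true := by
        rw [pvContains_labAux]; simpa
      have hadd : PySem.Set.add o s = o := by
        simp [PySem.Set.add, PySem.Set.contains, hm]
      have hstep : pvStepA (⟨pvLabAux o 1⟩, res, (o.length : Int) + 1) s
          = (⟨pvLabAux o 1⟩, res ++ [pvLab o s], (o.length : Int) + 1) := by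
        simp [pvStepA, hc, pvGetD_labAux o s hm]
      rw [List.foldl_cons, hstep, ih o (res ++ [pvLab o s])]
      rw [List.foldl_cons, hadd]
      rw [List.map_cons, pvLab_stable l o s hm]
      simp
    · have hc : (PySem.Dict.mk (pvLabAux o 1)).contains s = false := by
        rw [pvContains_labAux]; simpa
      have hmem : s ∈ o ++ [s] := by simp
      have hadd : PySem.Set.add o s = o ++ [s] := by
        simp [PySem.Set.add, PySem.Set.contains, hm]
      have hins : (PySem.Dict.mk (pvLabAux o 1)).insert s (PySem.Int.toStr ((o.length : Int) + 1))
          = ⟨pvLabAux (o ++ [s]) 1⟩ := by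
        simp only [PySem.Dict.insert, hc, Bool.false_eq_true, if_false]
        rw [pvLabAux_append, show (1 + (o.length : Int)) = (o.length : Int) + 1 from by omega]
      have hstep : pvStepA (⟨pvLabAux o 1⟩, res, (o.length : Int) + 1) s
          = (⟨pvLabAux (o ++ [s]) 1⟩, res ++ [pvLab (o ++ [s]) s], ((o ++ [s]).length : Int) + 1) := by
        simp only [pvStepA, hc, Bool.false_eq_true, if_false, hins]
        refine Prod.ext rfl (Prod.ext ?_ ?_)
        · simp [pvGetD_labAux (o ++ [s]) s hmem]
        · simp
      rw [List.foldl_cons, hstep, ih (o ++ [s]) (res ++ [pvLab (o ++ [s]) s])]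
      rw [List.foldl_cons, hadd]
      rw [List.map_cons, pvLab_stable l (o ++ [s]) s hmem]
      simp

-- B's prefix-count equals A's first-occurrence index plus one, relative to a seen-set o
lemma pvRank (l : List String) : ∀ (o : List String) (s : String) (j : Nat), s ∉ o →
    PySem.List.index? l s = some j →
    ∃ i, PySem.List.index? (l.foldl PySem.Set.add o) s = some i ∧
         ((l.take (j + 1)).foldl PySem.Set.add o).length = i + 1 := by
  induction l with
  | nil => intro o s j _ hj; simp [PySem.List.index?_eq_idxOf?] at hj
  | cons a t ih =>
    intro o s j ho hj
    by_cases h : a = s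
    · subst h
      rw [PySem.List.index?_cons_self] at hj
      obtain rfl : (0 : Nat) = j := by simpa using hj
      have hadd : PySem.Set.add o a = o ++ [a] := by
        simp [PySem.Set.add, PySem.Set.contains, ho]
      obtain ⟨r, hr⟩ := pvAdd_extends t (o ++ [a])
      refine ⟨o.length, ?_, ?_⟩
      · rw [List.foldl_cons, hadd, hr]
        rw [PySem.List.index?_append_of_mem r (by simp : a ∈ o ++ [a])]
        exact PySem.List.index?_append_singleton_self _ _ ho
      · simp [List.take, hadd]
    · rw [PySem.List.index?_cons_of_ne _ h] at hj
      cases hj' : PySem.List.index? t s with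
      | none => rw [hj'] at hj; simp at hj
      | some j' =>
        rw [hj'] at hj
        obtain rfl : j' + 1 = j := by simpa using hj
        have hs' : s ∉ PySem.Set.add o a := by
          simp only [PySem.Set.add, PySem.Set.contains]
          split
          · exact ho
          · simp [ho, Ne.symm h]
        obtain ⟨i, hi, hlen⟩ := ih (PySem.Set.add o a) s j' hs' hj'
        exact ⟨i, by rwa [List.foldl_cons], by rw [List.take_succ_cons, List.foldl_cons]; exact hlen⟩

-- ===== VERDICT (by name: the statement is the Claim_ definition above) =====
theorem map_to_possibility_spec : Claim_equal_map_to_possibility := by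
  intro b1 b2 _
  unfold Spec_map_to_possibility map_to_possibility map_to_possibility_alt
  simp only [← List.foldl_append]
  have h0 : ((⟨[]⟩, [], 1) : PySem.Dict String String × List String × Int)
      = (⟨pvLabAux [] 1⟩, ([] : List String), (([] : List String).length : Int) + 1) := by
    simp [pvLabAux]
  rw [h0, pvInv (b1 ++ b2) [] []]
  simp only [List.nil_append]
  refine List.map_congr_left ?_
  intro s hs
  have hmem := (PySem.List.index?_isSome_iff (b1 ++ b2) s).mpr hs
  cases hj : PySem.List.index? (b1 ++ b2) s with
  | none => rw [hj] at hmem; simp at hmem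
  | some j =>
    obtain ⟨i, hi, hlen⟩ := pvRank (b1 ++ b2) [] s j (by simp) hj
    have hslice : PySem.List.slice (b1 ++ b2) none (some ((j : Int) + 1))
        = (b1 ++ b2).take (j + 1) := by
      have : ((j : Int) + 1) = (((j + 1 : Nat) : Nat) : Int) := by push_cast; ring
      rw [this, PySem.List.slice_to_natCast]
    have hof : (PySem.Set.ofList ((b1 ++ b2).take (j + 1)) : List String)
        = ((b1 ++ b2).take (j + 1)).foldl PySem.Set.add [] := PySem.Set.ofList_eq_foldl _
    simp only [pvLab, hi, hslice, hof, hlen]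
    push_cast
    ring_nf
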